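-- pv_equiv track=rewrite | github.com/Airlectric/A2SV_Competitive_Programming | codeforces/D_Challenging_Valleys.py | isValley
-- ===== SOURCE A (Python) =====
-- def isValley(n, arr):
--     l = 0
--     count = 0
--
--     for r in range(n):
--         while arr[l] != arr[r]:
--             l += 1
--
--         if (l == 0 or arr[l-1] > arr[l]) and (r==n-1 or arr[r] < arr[r+1]):
--             count += 1
--
--     return 'YES' if count == 1 else 'NO'
-- ===== SOURCE B (Python) =====
-- def isValley(n, arr):
--     # compress consecutive duplicate values of the first n elements into runs
--     b = []
--     for i in range(n):
--         if not b or b[-1] != arr[i]: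
--             b.append(arr[i])
--     # one flag-carrying pass over the compressed sequence, counting local minima
--     count = 0
--     ok = True  # current run is entered by a strict drop (or starts the array)
--     for j in range(1, len(b)):
--         if ok and b[j - 1] < b[j]:
--             count += 1
--         ok = b[j - 1] > b[j]
--     if b and ok:
--         count += 1
--     return 'YES' if count == 1 else 'NO'
-- ===== Notes on version B (the rewrite author's own statement) =====
-- stated objective: alternative
-- what changed: A tracks a second pointer l with an inner while-loop to find the start of the current value's run and tests valley conditions with lookahead on the raw array; B first compresses the first n elements into a duplicate-free run sequence and then counts local minima of that sequence in one flag-carrying adjacent-pair scan.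
import Mathlib
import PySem

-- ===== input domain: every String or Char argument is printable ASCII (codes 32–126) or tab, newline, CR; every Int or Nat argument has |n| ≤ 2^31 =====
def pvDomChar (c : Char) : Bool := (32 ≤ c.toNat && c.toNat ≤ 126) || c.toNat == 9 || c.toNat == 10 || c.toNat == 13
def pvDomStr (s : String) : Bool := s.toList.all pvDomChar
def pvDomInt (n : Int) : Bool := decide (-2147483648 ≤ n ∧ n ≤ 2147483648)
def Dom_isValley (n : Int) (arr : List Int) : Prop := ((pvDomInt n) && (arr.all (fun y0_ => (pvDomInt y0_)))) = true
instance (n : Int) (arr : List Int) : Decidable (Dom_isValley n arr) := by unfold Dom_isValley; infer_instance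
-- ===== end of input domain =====

-- B replaces A's two-pointer/inner-while scan by run-compression followed by a
-- flag-carrying adjacent-pair scan counting local minima (objective: alternative).

-- ===== PORT A =====
-- the inner 'while arr[l] != arr[r]: l += 1' (fuel-bounded; inside Pre_ it always hits a match)
def pvWhileA (arr : List Int) (v : Int) : Nat → Int → Int
  | 0, l => l
  | fuel+1, l => if PySem.List.pyGetD arr l 0 ≠ v then pvWhileA arr v fuel (l + 1) else l

-- one iteration of A's 'for r in range(n)' loop on the state (l, count)
def pvStepA (n : Int) (arr : List Int) (st : Int × Int) (r : Int) : Int × Int :=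
  let l := pvWhileA arr (PySem.List.pyGetD arr r 0) (arr.length + 1) st.1
  let cnt := if (decide (l = 0) || decide (PySem.List.pyGetD arr (l - 1) 0 > PySem.List.pyGetD arr l 0))
               && (decide (r = n - 1) || decide (PySem.List.pyGetD arr r 0 < PySem.List.pyGetD arr (r + 1) 0))
             then st.2 + 1 else st.2
  (l, cnt)

def isValley (n : Int) (arr : List Int) : String :=
  let st := (PySem.List.pyRange 0 n 1).foldl (pvStepA n arr) (0, 0)
  if st.2 = 1 then "YES" else "NO"

-- ===== PORT B =====
-- 'if not b or b[-1] != x: b.append(x)'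
def pvPushB (b : List Int) (x : Int) : List Int :=
  if b = [] ∨ b.getLast? ≠ some x then b ++ [x] else b

-- one iteration of B's 'for j in range(1, len(b))' loop on the state (count, ok)
def pvScanStepB (b : List Int) (st : Int × Bool) (j : Int) : Int × Bool :=
  (if st.2 && decide (PySem.List.pyGetD b (j - 1) 0 < PySem.List.pyGetD b j 0) then st.1 + 1 else st.1,
   decide (PySem.List.pyGetD b (j - 1) 0 > PySem.List.pyGetD b j 0))

def isValley_alt (n : Int) (arr : List Int) : String :=
  let b := (PySem.List.pyRange 0 n 1).foldl (fun b i => pvPushB b (PySem.List.pyGetD arr i 0)) []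
  let st := (PySem.List.pyRange 1 (b.length : Int) 1).foldl (pvScanStepB b) (0, true)
  let count := if b ≠ [] ∧ st.2 then st.1 + 1 else st.1
  if count = 1 then "YES" else "NO"

-- ===== PRECONDITION & SPEC =====
-- A raises IndexError as soon as r reaches arr's length, i.e. exactly when n > len(arr); Pre_ excludes only that.
def Pre_isValley (n : Int) (arr : List Int) : Prop := n ≤ (arr.length : Int)
instance (n : Int) (arr : List Int) : Decidable (Pre_isValley n arr) := by unfold Pre_isValley; infer_instance
def pvWitness_isValley : Int × List Int := (4, [3, 1, 1, 2])

def Spec_isValley (n : Int) (arr : List Int) (out : String) : Prop := out = isValley_alt n arr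
instance (n : Int) (arr : List Int) (out : String) : Decidable (Spec_isValley n arr out) := by unfold Spec_isValley; infer_instance

-- ===== CLAIM (what is proved, stated in full; the proofs are below) =====
def Claim_equal_isValley : Prop := ∀ (n : Int) (arr : List Int), Dom_isValley n arr → Pre_isValley n arr → Spec_isValley n arr (isValley n arr)

-- ===== LEMMAS AND PROOFS =====

-- the suffix arr[k:m] (by getD; used only at indices < m ≤ len arr)
def pvSfx (arr : List Int) (m k : Nat) : List Int :=
  if _h : k < m then arr.getD k 0 :: pvSfx arr m (k + 1) else []
termination_by m - k

-- run-compression with previous value p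
def pvComp (p : Int) : List Int → List Int
  | [] => []
  | x :: t => if x = p then pvComp p t else x :: pvComp x t

-- count of valley runs in a list, given the value x of the current run and whether it was entered by a strict drop
def pvG (lok : Bool) (x : Int) : List Int → Int
  | [] => if lok then 1 else 0
  | y :: t => if y = x then pvG lok x t
              else (if lok && decide (x < y) then 1 else 0) + pvG (decide (x > y)) y t

-- start index of the run containing k
def pvRho (arr : List Int) : Nat → Nat
  | 0 => 0
  | k+1 => if arr.getD (k + 1) 0 = arr.getD k 0 then pvRho arr k else k + 1

def pvFlag (arr : List Int) (k : Nat) : Bool :=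
  decide (pvRho arr k = 0) || decide (arr.getD (pvRho arr k - 1) 0 > arr.getD (pvRho arr k) 0)

-- A's fold state after the first k iterations
theorem pvRho_succ (arr : List Int) (k : Nat) :
    pvRho arr (k + 1) = if arr.getD (k + 1) 0 = arr.getD k 0 then pvRho arr k else k + 1 := rfl

def pvStA (n : Int) (arr : List Int) (k : Nat) : Int × Int :=
  (List.range k).foldl (fun st (i : Nat) => pvStepA n arr st (i : Int)) (0, 0)

theorem pvRho_le (arr : List Int) : ∀ k, pvRho arr k ≤ k := by
  intro k; induction k with
  | zero => simp [pvRho]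
  | succ k ih => unfold pvRho; split <;> omega

theorem pvRho_run (arr : List Int) : ∀ k j, pvRho arr k ≤ j → j ≤ k → arr.getD j 0 = arr.getD k 0 := by
  intro k; induction k with
  | zero =>
    intro j _ h2
    have : j = 0 := by omega
    subst this; rfl
  | succ k ih =>
    intro j h1 h2
    unfold pvRho at h1
    split at h1
    · rename_i heq
      rcases Nat.lt_or_ge j (k + 1) with h | h
      · rw [ih j h1 (by omega)]; exact heq.symm
      · have : j = k + 1 := by omega
        subst this; rfl
    · have : j = k + 1 := by omega
      subst this; rfl

theorem pvWhileA_eq (arr : List Int) (v : Int) :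
    ∀ (fuel s t : Nat), s ≤ t → t - s < fuel →
      (∀ j, s ≤ j → j < t → arr.getD j 0 ≠ v) → arr.getD t 0 = v →
      pvWhileA arr v fuel (s : Int) = (t : Int) := by
  intro fuel
  induction fuel with
  | zero => intro s t _ h; omega
  | succ fuel ih =>
    intro s t hst hf hne hv
    unfold pvWhileA
    rw [PySem.List.pyGetD_natCast]
    rcases Nat.eq_or_lt_of_le hst with heq | hlt
    · subst heq
      rw [if_neg (by simpa using hv)]
    · have hne' : arr.getD s 0 ≠ v := hne s le_rfl hlt
      simp only [hne', if_pos, ne_eq, not_false_eq_true, if_true]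
      have : (s : Int) + 1 = ((s + 1 : Nat) : Int) := by push_cast; ring
      rw [this, ih (s + 1) t (by omega) (by omega) (fun j h1 h2 => hne j (by omega) h2) hv]

theorem pvFoldPush (xs : List Int) :
    ∀ (acc : List Int) (p : Int), acc.getLast? = some p →
      xs.foldl pvPushB acc = acc ++ pvComp p xs := by
  induction xs with
  | nil => intro acc p _; simp [pvComp]
  | cons x xs ih =>
    intro acc p hl
    have hacc : acc ≠ [] := by intro h; subst h; simp at hl
    by_cases hx : x = p
    · subst hx
      have : pvPushB acc x = acc := by
        unfold pvPushB
        simp [hacc, hl]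
      simp only [List.foldl_cons, this, pvComp, if_pos rfl]
      exact ih acc x hl
    · have : pvPushB acc x = acc ++ [x] := by
        unfold pvPushB
        rw [if_pos]
        right; rw [hl]; simp [Ne.symm hx]
      simp only [List.foldl_cons, this, pvComp, if_neg hx]
      rw [ih (acc ++ [x]) x (by simp)]
      simp

theorem pvChainComp : ∀ (t : List Int) (x : Int), List.IsChain (· ≠ ·) (x :: pvComp x t) := by
  intro t
  induction t with
  | nil => intro x; rw [pvComp]; exact List.IsChain.singleton x
  | cons y t ih =>
    intro x
    by_cases hy : y = x
    · simpa [pvComp, hy] using ih x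
    · show List.IsChain (· ≠ ·) (x :: pvComp x (y :: t))
      rw [pvComp, if_neg hy, List.isChain_cons_cons]
      exact ⟨Ne.symm hy, ih y⟩

theorem pvG_comp : ∀ (t : List Int) (lok : Bool) (x : Int), pvG lok x (pvComp x t) = pvG lok x t := by
  intro t
  induction t with
  | nil => intro lok x; simp [pvComp]
  | cons y t ih =>
    intro lok x
    by_cases hy : y = x
    · rw [pvComp, if_pos hy, ih, pvG, if_pos hy]
    · rw [pvComp, if_neg hy, pvG, if_neg hy, pvG, if_neg hy, ih]

theorem pvGetD_of_drop {b : List Int} {j : Nat} {x : Int} {t : List Int}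
    (h : b.drop j = x :: t) : b.getD j 0 = x := by
  have h0 : (b.drop j)[0]? = some x := by rw [h]; rfl
  rw [List.getElem?_drop] at h0
  simp only [Nat.add_zero] at h0
  simp [List.getD_eq_getElem?_getD, h0]

theorem pvScanB (b : List Int) :
    ∀ (t : List Int) (j : Nat) (x : Int) (c : Int) (lok : Bool),
      1 ≤ j → b.drop (j - 1) = x :: t → List.IsChain (· ≠ ·) (x :: t) →
      (((PySem.List.pyRange (j : Int) (b.length : Int) 1).foldl (pvScanStepB b) (c, lok)).1 +
        (if ((PySem.List.pyRange (j : Int) (b.length : Int) 1).foldl (pvScanStepB b) (c, lok)).2 then 1 else 0))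
      = c + pvG lok x t := by
  intro t
  induction t with
  | nil =>
    intro j x c lok hj hdrop _
    have hlen : b.length = j := by
      have := congrArg List.length hdrop
      simp at this; omega
    rw [PySem.List.pyRange_one_eq_nil (by omega)]
    simp [pvG]
  | cons y t ih =>
    intro j x c lok hj hdrop hchain
    have hlen : j < b.length := by
      have := congrArg List.length hdrop
      simp at this; omega
    have hx : b.getD (j - 1) 0 = x := pvGetD_of_drop hdrop
    have hdropj : b.drop j = y :: t := by
      have : b.drop ((j - 1) + 1) = y :: t := by
        rw [← List.drop_drop, hdrop]; rfl
      rwa [Nat.sub_add_cancel hj] at this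
    have hy : b.getD j 0 = y := pvGetD_of_drop hdropj
    rw [PySem.List.pyRange_one_cons (by exact_mod_cast hlen)]
    rw [List.foldl_cons]
    have hstep : pvScanStepB b (c, lok) (j : Int) =
        ((if lok && decide (x < y) then c + 1 else c), decide (x > y)) := by
      unfold pvScanStepB
      have h1 : (j : Int) - 1 = ((j - 1 : Nat) : Int) := by omega
      rw [h1, PySem.List.pyGetD_natCast, PySem.List.pyGetD_natCast, hx, hy]
    rw [hstep]
    have hcast : (j : Int) + 1 = ((j + 1 : Nat) : Int) := by push_cast; ring
    rw [hcast]
    rw [List.isChain_cons_cons] at hchain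
    have := ih (j + 1) y (if lok && decide (x < y) then c + 1 else c) (decide (x > y))
      (by omega) (by simpa using hdropj) hchain.2
    rw [this]
    have hyx : ¬ (y = x) := Ne.symm hchain.1
    rw [pvG, if_neg hyx]
    split <;> ring

theorem pvSfx_cons (arr : List Int) (m k : Nat) (h : k < m) :
    pvSfx arr m k = arr.getD k 0 :: pvSfx arr m (k + 1) := by
  rw [pvSfx]; simp [h]

theorem pvSfx_nil (arr : List Int) (m k : Nat) (h : ¬ k < m) : pvSfx arr m k = [] := by
  rw [pvSfx]; simp [h]

theorem pvSfx_eq_map (arr : List Int) (m : Nat) :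
    ∀ k, pvSfx arr m k = (List.range' k (m - k)).map (fun i => arr.getD i 0) := by
  intro k
  induction hk : m - k generalizing k with
  | zero => rw [pvSfx_nil arr m k (by omega)]; simp
  | succ d ih =>
    rw [pvSfx_cons arr m k (by omega), List.range'_succ]
    simp only [List.map_cons, List.cons.injEq, true_and]
    rw [ih (k + 1) (by omega)]

theorem pvStA_succ (n : Int) (arr : List Int) (k : Nat) :
    pvStA n arr (k + 1) = pvStepA n arr (pvStA n arr k) (k : Int) := by
  unfold pvStA
  rw [List.range_succ, List.foldl_append]
  rfl

-- the main loop invariant for A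
theorem pvA_inv (n : Int) (arr : List Int) (m : Nat) (hn : n = (m : Int)) (hm : 1 ≤ m)
    (hlen : m ≤ arr.length) :
    ∀ k, k ≤ m →
      (pvStA n arr k).1 = ((pvRho arr (k - 1) : Nat) : Int) ∧
      (pvStA n arr k).2 +
        (if k < m then pvG (pvFlag arr k) (arr.getD k 0) (pvSfx arr m (k + 1)) else 0)
      = pvG true (arr.getD 0 0) (pvSfx arr m 1) := by
  intro k
  induction k with
  | zero =>
    intro _
    refine ⟨by simp [pvStA, pvRho], ?_⟩
    rw [if_pos (by omega : 0 < m)]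
    have h0 : pvFlag arr 0 = true := by simp [pvFlag, pvRho]
    rw [h0]
    simp [pvStA]
  | succ k ihk =>
    intro hk1
    have hk : k < m := by omega
    obtain ⟨ihl, ihc⟩ := ihk (by omega)
    rw [pvStA_succ]
    -- evaluate the step
    set s := pvRho arr (k - 1) with hs
    set t := pvRho arr k with ht
    -- the while loop lands on the run start of k
    have hwhile : pvWhileA arr (arr.getD k 0) (arr.length + 1) ((s : Nat) : Int) = ((t : Nat) : Int) := by
      have hts : s ≤ t ∧ (∀ j, s ≤ j → j < t → arr.getD j 0 ≠ arr.getD k 0) ∧ arr.getD t 0 = arr.getD k 0 := by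
        rcases Nat.eq_zero_or_pos k with h0 | hpos
        · subst h0
          refine ⟨le_rfl, fun j h1 h2 => by simp [hs, pvRho] at *; omega, ?_⟩
          have : t = 0 := by simp [ht, pvRho]
          rw [this]
        · have hk1' : k - 1 + 1 = k := by omega
          have htdef : t = if arr.getD k 0 = arr.getD (k - 1) 0 then s else k := by
            rw [ht, hs, ← hk1', pvRho_succ, hk1']
          by_cases heq : arr.getD k 0 = arr.getD (k - 1) 0
          · rw [htdef, if_pos heq]
            refine ⟨le_rfl, fun j h1 h2 => by omega, ?_⟩
            rw [pvRho_run arr (k - 1) s hs.ge (pvRho_le arr (k - 1)), heq]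
          · rw [htdef, if_neg heq]
            refine ⟨by have := pvRho_le arr (k - 1); omega, ?_, rfl⟩
            intro j h1 h2
            rw [pvRho_run arr (k - 1) j h1 (by omega)]
            exact fun h => heq h.symm
      exact pvWhileA_eq arr (arr.getD k 0) (arr.length + 1) s t hts.1
        (by have := pvRho_le arr k; omega) hts.2.1 hts.2.2
    have hl1 : (pvStepA n arr (pvStA n arr k) (k : Int)).1 = ((t : Nat) : Int) := by
      unfold pvStepA
      simp only [ihl, PySem.List.pyGetD_natCast, hwhile]
    constructor
    · simpa using hl1
    · -- count component
      have hleft : (decide (((t : Nat) : Int) = 0) ||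
          decide (PySem.List.pyGetD arr (((t : Nat) : Int) - 1) 0 > arr.getD t 0))
          = pvFlag arr k := by
        unfold pvFlag
        rw [← ht]
        rcases t with _ | t'
        · simp
        · have h1 : ((t' + 1 : Nat) : Int) - 1 = ((t' : Nat) : Int) := by push_cast; ring
          rw [h1, PySem.List.pyGetD_natCast]
          have e1 : (decide (((t' + 1 : Nat) : Int) = 0)) = false := by
            apply decide_eq_false; push_cast; omega
          have e2 : (decide ((t' + 1 : Nat) = 0)) = false := by
            apply decide_eq_false; omega
          rw [e1, e2]
          simp
      have hright : (decide ((k : Int) = n - 1) ||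
          decide (arr.getD k 0 < PySem.List.pyGetD arr (((k : Nat) : Int) + 1) 0))
          = (decide (k = m - 1) || decide (arr.getD k 0 < arr.getD (k + 1) 0)) := by
        have h2 : ((k : Nat) : Int) + 1 = ((k + 1 : Nat) : Int) := by push_cast; ring
        have e : (decide ((k : Int) = n - 1)) = (decide (k = m - 1)) := by
          simp only [decide_eq_decide]; rw [hn]; omega
        rw [h2, PySem.List.pyGetD_natCast, e]
      have hc : (pvStepA n arr (pvStA n arr k) (k : Int)).2 =
          (pvStA n arr k).2 +
            (if pvFlag arr k && (decide (k = m - 1) || decide (arr.getD k 0 < arr.getD (k + 1) 0)) then 1 else 0) := by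
        unfold pvStepA
        simp only [ihl, PySem.List.pyGetD_natCast, hwhile]
        rw [hleft, hright]
        cases hb : (pvFlag arr k && (decide (k = m - 1) || decide (arr.getD k 0 < arr.getD (k + 1) 0))) <;> simp
      rw [hc]
      by_cases hke : k + 1 < m
      · -- interior step
        have hkm : ¬ (k = m - 1) := by omega
        have hflag := pvRho_succ arr k
        rw [if_pos hke]
        rw [if_pos hk] at ihc
        rw [pvSfx_cons arr m (k + 1) hke] at ihc
        by_cases heq : arr.getD (k + 1) 0 = arr.getD k 0
        · have hflag' : pvFlag arr (k + 1) = pvFlag arr k := by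
            unfold pvFlag; rw [hflag, if_pos heq]
          rw [pvG, if_pos heq] at ihc
          have hzero : (if pvFlag arr k && (decide (k = m - 1) || decide (arr.getD k 0 < arr.getD (k + 1) 0)) then (1:Int) else 0) = 0 := by
            have e1 : (decide (k = m - 1)) = false := by exact decide_eq_false hkm
            have e2 : (decide (arr.getD k 0 < arr.getD (k + 1) 0)) = false := by
              apply decide_eq_false; rw [heq]; exact lt_irrefl _
            rw [e1, e2]
            simp
          rw [hzero, add_zero, hflag', heq]
          exact ihc
        · have hflag' : pvFlag arr (k + 1) = decide (arr.getD k 0 > arr.getD (k + 1) 0) := by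
            unfold pvFlag; rw [hflag, if_neg heq]; simp
          rw [pvG, if_neg heq] at ihc
          rw [hflag']
          have : (if pvFlag arr k && (decide (k = m - 1) || decide (arr.getD k 0 < arr.getD (k + 1) 0)) then (1:Int) else 0)
              = (if pvFlag arr k && decide (arr.getD k 0 < arr.getD (k + 1) 0) then (1:Int) else 0) := by
            simp [hkm]
          rw [this]
          omega
      · -- last step: k = m - 1
        have hkm : k = m - 1 := by omega
        have hnotlt : ¬ (k + 1 < m) := hke
        rw [if_neg hnotlt, add_zero]
        rw [if_pos hk, pvSfx_nil arr m (k + 1) (by omega)] at ihc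
        have : (if pvFlag arr k && (decide (k = m - 1) || decide (arr.getD k 0 < arr.getD (k + 1) 0)) then (1:Int) else 0)
            = (if pvFlag arr k then (1:Int) else 0) := by
          simp [hkm]
        rw [this]
        rw [pvG] at ihc
        rcases h : pvFlag arr k <;> simp [h] at ihc ⊢ <;> omega

theorem pvRange_cast (n : Int) (m : Nat) (hn : n = (m : Int)) :
    PySem.List.pyRange 0 n 1 = (List.range m).map (fun (i : Nat) => (i : Int)) := by
  rw [PySem.List.pyRange_one, hn]
  simp only [sub_zero, Int.toNat_natCast]
  exact List.map_congr_left (fun a _ => by omega)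

-- A's total count
theorem pvA_count (n : Int) (arr : List Int) (m : Nat) (hn : n = (m : Int)) (hm : 1 ≤ m)
    (hlen : m ≤ arr.length) :
    ((PySem.List.pyRange 0 n 1).foldl (pvStepA n arr) (0, 0)).2 = pvG true (arr.getD 0 0) (pvSfx arr m 1) := by
  rw [pvRange_cast n m hn, List.foldl_map]
  have := pvA_inv n arr m hn hm hlen m le_rfl
  rw [if_neg (by omega)] at this
  have h2 := this.2
  rw [add_zero] at h2
  exact h2

-- B's compressed list
theorem pvB_list (n : Int) (arr : List Int) (m : Nat) (hn : n = (m : Int)) (hm : 1 ≤ m) :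
    (PySem.List.pyRange 0 n 1).foldl (fun b i => pvPushB b (PySem.List.pyGetD arr i 0)) []
      = arr.getD 0 0 :: pvComp (arr.getD 0 0) (pvSfx arr m 1) := by
  rw [pvRange_cast n m hn, List.foldl_map]
  simp only [PySem.List.pyGetD_natCast]
  have : (List.range m).foldl (fun b (i : Nat) => pvPushB b (arr.getD i 0)) []
      = ((List.range m).map (fun i => arr.getD i 0)).foldl pvPushB [] := by
    rw [List.foldl_map]
  rw [this]
  have hmap : (List.range m).map (fun i => arr.getD i 0) = pvSfx arr m 0 := by
    rw [pvSfx_eq_map arr m 0, List.range_eq_range']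
    simp
  rw [hmap, pvSfx_cons arr m 0 (by omega), List.foldl_cons]
  have hfirst : pvPushB [] (arr.getD 0 0) = [arr.getD 0 0] := by
    unfold pvPushB; simp
  rw [hfirst, pvFoldPush (pvSfx arr m 1) [arr.getD 0 0] (arr.getD 0 0) (by simp)]
  simp

-- evaluated (let-free) forms of the two ports
theorem pv_isValley_eval (n : Int) (arr : List Int) :
    isValley n arr =
      (if ((PySem.List.pyRange 0 n 1).foldl (pvStepA n arr) (0, 0)).2 = 1 then "YES" else "NO") := rfl

def pvAltOf (b : List Int) : String :=
  let st := (PySem.List.pyRange 1 (b.length : Int) 1).foldl (pvScanStepB b) (0, true)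
  let count := if b ≠ [] ∧ st.2 then st.1 + 1 else st.1
  if count = 1 then "YES" else "NO"

theorem pv_isValley_alt_eval (n : Int) (arr : List Int) :
    isValley_alt n arr =
      pvAltOf ((PySem.List.pyRange 0 n 1).foldl (fun b i => pvPushB b (PySem.List.pyGetD arr i 0)) []) := rfl

theorem pvAltOf_eval (b : List Int) :
    pvAltOf b =
      (if (if b ≠ [] ∧ ((PySem.List.pyRange 1 (b.length : Int) 1).foldl (pvScanStepB b) (0, true)).2
           then ((PySem.List.pyRange 1 (b.length : Int) 1).foldl (pvScanStepB b) (0, true)).1 + 1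
           else ((PySem.List.pyRange 1 (b.length : Int) 1).foldl (pvScanStepB b) (0, true)).1) = 1
       then "YES" else "NO") := rfl

-- ===== VERDICT (by name: the statement is the Claim_ definition above) =====
theorem isValley_spec : Claim_equal_isValley := by
  unfold Claim_equal_isValley
  intro n arr _hdom hpre
  unfold Spec_isValley Pre_isValley at *
  rcases le_or_gt n 0 with hn0 | hn0
  · -- n ≤ 0: both loops are empty, both answer "NO"
    rw [pv_isValley_eval, pv_isValley_alt_eval, PySem.List.pyRange_one_eq_nil hn0, pvAltOf_eval]
    simp
  · -- n ≥ 1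
    have hn : n = ((n.toNat : Nat) : Int) := by omega
    have hm1 : 1 ≤ n.toNat := by omega
    have hlen : n.toNat ≤ arr.length := by omega
    rw [pv_isValley_eval, pv_isValley_alt_eval, pvB_list n arr n.toNat hn hm1, pvAltOf_eval,
      pvA_count n arr n.toNat hn hm1 hlen]
    set x := arr.getD 0 0 with hx
    set t := pvSfx arr n.toNat 1 with ht
    set b := x :: pvComp x t with hb
    have hbne : b ≠ [] := by simp [hb]
    set st := (PySem.List.pyRange 1 (b.length : Int) 1).foldl (pvScanStepB b) (0, true) with hst
    have hcount : st.1 + (if st.2 then (1:Int) else 0) = pvG true x t := by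
      have h1 : ((1 : Nat) : Int) = (1 : Int) := by norm_num
      have hscan := pvScanB b (pvComp x t) 1 x 0 true le_rfl (by simp [hb]) (pvChainComp t x)
      rw [h1] at hscan
      rw [hst, hscan, zero_add, pvG_comp]
    simp only [hbne, ne_eq, not_false_eq_true, true_and]
    rcases h2 : st.2 <;> rw [h2] at hcount <;> simp at hcount <;> rw [← hcount] <;> simp
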